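-- pv_equiv track=rewrite | github.com/SZU-AdvTech-2023/146-Multi-Modality-Deep-Network-for-Extreme-Learned-Image-Compression | utils.py | find_the_second_char_for_string
-- ===== SOURCE A (Python) =====
-- def find_the_second_char_for_string(s, c, order=2):
--     t = order
--     for i in range(len(s) - 1, -1, -1):
--         if s[i] == c:
--             t -= 1
--             if t == 0:
--                 return i
--     return -1
-- ===== SOURCE B (Python) =====
-- def find_the_second_char_for_string(s, c, order=2):
--     idx = [i for i, ch in enumerate(s) if ch == c]
--     if 1 <= order <= len(idx):
--         return idx[-order]
--     return -1
-- ===== Notes on version B (the rewrite author's own statement) =====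
-- stated objective: alternative
-- what changed: Replaces the reverse scan with a countdown counter by one forward pass collecting all match positions followed by a direct negative-index selection idx[-order].
import Mathlib
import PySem

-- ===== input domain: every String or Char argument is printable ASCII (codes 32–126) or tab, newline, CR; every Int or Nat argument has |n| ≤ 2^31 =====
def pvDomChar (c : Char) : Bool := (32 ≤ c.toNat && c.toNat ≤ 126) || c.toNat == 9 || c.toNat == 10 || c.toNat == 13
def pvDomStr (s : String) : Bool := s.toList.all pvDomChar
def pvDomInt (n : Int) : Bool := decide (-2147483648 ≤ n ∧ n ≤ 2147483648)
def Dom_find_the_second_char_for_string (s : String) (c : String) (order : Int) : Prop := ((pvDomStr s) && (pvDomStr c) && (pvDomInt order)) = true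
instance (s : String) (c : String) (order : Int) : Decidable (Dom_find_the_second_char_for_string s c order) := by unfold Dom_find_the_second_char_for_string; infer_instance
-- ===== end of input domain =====

-- B collects all match positions in one forward pass and selects idx[-order]; A scans backwards with a countdown counter. Alternative decomposition, same cost.

-- ===== PORT A =====
-- the 'for i in range(len(s)-1, -1, -1)' loop: scan the reversed char list while counting the python index i down
def pvGoA (c : List Char) : List Char → Int → Int → Int
  | [], _, _ => -1
  | ch :: rest, i, t =>
    if [ch] = c then
      if t - 1 = 0 then i else pvGoA c rest (i - 1) (t - 1)
    else pvGoA c rest (i - 1) t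

def find_the_second_char_for_string (s : String) (c : String) (order : Int) : Int :=
  pvGoA c.toList s.toList.reverse ((s.toList.length : Int) - 1) order

-- ===== PORT B =====
def find_the_second_char_for_string_alt (s : String) (c : String) (order : Int) : Int :=
  let idx : List Int := ((PySem.List.enumerate s.toList 0).filter (fun p => [p.2] = c.toList)).map (·.1)
  if 1 ≤ order ∧ order ≤ (idx.length : Int) then (PySem.List.pyGet? idx (-order)).getD 0 else -1

-- ===== PRECONDITION & SPEC =====
def Spec_find_the_second_char_for_string (s : String) (c : String) (order : Int) (out : Int) : Prop := out = find_the_second_char_for_string_alt s c order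
instance (s : String) (c : String) (order : Int) (out : Int) : Decidable (Spec_find_the_second_char_for_string s c order out) := by unfold Spec_find_the_second_char_for_string; infer_instance

-- ===== CLAIM (what is proved, stated in full; the proofs are below) =====
def Claim_equal_find_the_second_char_for_string : Prop := ∀ (s : String) (c : String) (order : Int), Dom_find_the_second_char_for_string s c order → Spec_find_the_second_char_for_string s c order (find_the_second_char_for_string s c order)

-- ===== LEMMAS AND PROOFS =====

-- indices (0-based, from the front) of the characters of l matching c
def pvMI (c : List Char) : List Char → List Nat
  | [] => []
  | ch :: rest => if [ch] = c then 0 :: (pvMI c rest).map (· + 1) else (pvMI c rest).map (· + 1)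

theorem pvMI_enum (c : List Char) (l : List Char) (s : Int) :
    ((PySem.List.enumerate l s).filter (fun p => [p.2] = c)).map (·.1)
      = (pvMI c l).map (fun k => s + (k : Nat)) := by
  induction l generalizing s with
  | nil => simp [pvMI, PySem.List.enumerate_nil]
  | cons a l ih =>
    by_cases h : [a] = c <;>
      simp [pvMI, PySem.List.enumerate_cons, h, ih] <;>
      · intro k _; omega

theorem pvMI_append (c xs ys : List Char) :
    pvMI c (xs ++ ys) = pvMI c xs ++ (pvMI c ys).map (· + xs.length) := by
  induction xs with
  | nil => simp [pvMI]
  | cons a xs ih =>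
    by_cases h : [a] = c <;>
      simp [pvMI, h, ih, List.map_map]

theorem pvMI_reverse (c l : List Char) :
    pvMI c l.reverse = ((pvMI c l).map (fun j => l.length - 1 - j)).reverse := by
  induction l with
  | nil => simp [pvMI]
  | cons a l ih =>
    rw [List.reverse_cons, pvMI_append, ih]
    by_cases h : [a] = c <;>
      simp [pvMI, h, List.map_map, Function.comp] <;>
      · intro k _; omega

theorem pvMI_lt (c : List Char) (l : List Char) : ∀ j ∈ pvMI c l, j < l.length := by
  induction l with
  | nil => simp [pvMI]
  | cons a l ih =>
    intro j hj
    by_cases h : [a] = c <;> simp [pvMI, h] at hj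
    · rcases hj with rfl | ⟨k, hk, rfl⟩
      · simp
      · have := ih k hk; simp; omega
    · rcases hj with ⟨k, hk, rfl⟩
      have := ih k hk; simp; omega

theorem pvGoA_eq (c : List Char) (r : List Char) : ∀ (i t : Int),
    pvGoA c r i t = if 1 ≤ t ∧ t ≤ ((pvMI c r).length : Int)
      then i - (((pvMI c r).getD (t.toNat - 1) 0 : Nat) : Int) else -1 := by
  induction r with
  | nil => intro i t; simp [pvGoA, pvMI]; omega
  | cons a r ih =>
    intro i t
    by_cases hP : [a] = c
    · by_cases ht : t = 1
      · subst ht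
        simp [pvGoA, pvMI, hP]
      · have h1 : ¬ (t - 1 = 0) := by omega
        rw [show pvGoA c (a :: r) i t = pvGoA c r (i - 1) (t - 1) by
          simp [pvGoA, hP, h1]]
        rw [ih]
        simp only [pvMI, if_pos hP, List.length_cons, List.length_map]
        by_cases hc : 1 ≤ t - 1 ∧ t - 1 ≤ ((pvMI c r).length : Int)
        · rw [if_pos hc, if_pos (by push_cast; omega)]
          have hlt : t.toNat - 2 < (pvMI c r).length := by omega
          have e1 : ((0 :: (pvMI c r).map (· + 1)).getD (t.toNat - 1) 0)
              = (pvMI c r)[t.toNat - 2] + 1 := by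
            rw [show t.toNat - 1 = (t.toNat - 2) + 1 from by omega, List.getD_cons_succ,
              List.getD_eq_getElem _ _ (by simpa using hlt), List.getElem_map]
          have e2 : ((pvMI c r).getD ((t - 1).toNat - 1) 0) = (pvMI c r)[t.toNat - 2] := by
            rw [show (t - 1).toNat - 1 = t.toNat - 2 from by omega]
            exact List.getD_eq_getElem _ _ hlt
          rw [e1, e2]
          push_cast; ring
        · rw [if_neg hc, if_neg (by push_cast; omega)]
    · rw [show pvGoA c (a :: r) i t = pvGoA c r (i - 1) t by simp [pvGoA, hP]]
      rw [ih]
      simp only [pvMI, if_neg hP, List.length_map]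
      by_cases hc : 1 ≤ t ∧ t ≤ ((pvMI c r).length : Int)
      · rw [if_pos hc, if_pos hc]
        have hlt : t.toNat - 1 < (pvMI c r).length := by omega
        have e1 : (((pvMI c r).map (· + 1)).getD (t.toNat - 1) 0)
            = (pvMI c r)[t.toNat - 1] + 1 := by
          rw [List.getD_eq_getElem _ _ (by simpa using hlt), List.getElem_map]
        have e2 : ((pvMI c r).getD (t.toNat - 1) 0) = (pvMI c r)[t.toNat - 1] :=
          List.getD_eq_getElem _ _ hlt
        rw [e1, e2]
        push_cast; ring
      · rw [if_neg hc, if_neg hc]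

-- ===== VERDICT (by name: the statement is the Claim_ definition above) =====
theorem find_the_second_char_for_string_spec : Claim_equal_find_the_second_char_for_string := by
  intro s c order _
  unfold Spec_find_the_second_char_for_string find_the_second_char_for_string
    find_the_second_char_for_string_alt
  set l := s.toList with hl
  set cl := c.toList with hcl
  set m := pvMI cl l with hm
  rw [pvGoA_eq, pvMI_reverse]
  rw [show ((PySem.List.enumerate l 0).filter (fun p => [p.2] = cl)).map (·.1)
        = m.map (fun k => (0 : Int) + (k : Nat)) from pvMI_enum cl l 0]
  simp only [List.length_reverse, List.length_map, zero_add]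
  by_cases hc : 1 ≤ order ∧ order ≤ (m.length : Int)
  · rw [if_pos hc, if_pos hc]
    have hn : m.length - order.toNat < m.length := by omega
    have hrev : (((m.map (fun j => l.length - 1 - j)).reverse).getD (order.toNat - 1) 0)
        = l.length - 1 - m[m.length - order.toNat] := by
      rw [List.getD_eq_getElem _ _ (by simp; omega), List.getElem_reverse, List.getElem_map]
      simp only [List.length_map]
      simp only [show m.length - 1 - (order.toNat - 1) = m.length - order.toNat from by omega]
    rw [hrev]
    have hneg : PySem.List.pyGet? (m.map (fun k => ((k : Nat) : Int))) (-order)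
        = some ((m[m.length - order.toNat] : Nat) : Int) := by
      rw [show -order = -((order.toNat : Nat) : Int) from by omega,
        PySem.List.pyGet?_neg_natCast _ order.toNat (by omega) (by simp; omega)]
      simp only [List.length_map]
      rw [List.getElem?_map, List.getElem?_eq_getElem hn]
      rfl
    rw [hneg]
    have hjlt : m[m.length - order.toNat] < l.length :=
      pvMI_lt cl l _ (List.getElem_mem _)
    simp only [Option.getD_some]
    omega
  · rw [if_neg hc, if_neg hc]
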